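-- pv_equiv track=rewrite | github.com/Rooturing/HTTPSTester | scripts/util/if_login.py | compare_ancestor
-- ===== SOURCE A (Python) =====
-- def compare_ancestor(ancestors1, ancestors2):
--     ancestor_tmp = list()
--     for ancestor1 in ancestors1:
--         for ancestor2 in ancestors2:
--             if len(ancestor1) == len(ancestor2):
--                 # if ancestor1[len(ancestor1)-1] == ancestor2[len(ancestor2)-1]:
--                 ancestor_tmp.append(ancestor2)
--             else:
--                 continue
--     return ancestor_tmp
-- ===== SOURCE B (Python) =====
-- def compare_ancestor(ancestors1, ancestors2):
--     buckets = {}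
--     for ancestor2 in ancestors2:
--         buckets.setdefault(len(ancestor2), []).append(ancestor2)
--     ancestor_tmp = []
--     for ancestor1 in ancestors1:
--         ancestor_tmp.extend(buckets.get(len(ancestor1), []))
--     return ancestor_tmp
-- ===== Notes on version B (the rewrite author's own statement) =====
-- stated objective: faster
-- what changed: Replaced the nested scan of ancestors2 per ancestors1 element by a one-pass length-keyed bucket dict, then one extend per ancestors1 element.
import Mathlib
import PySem

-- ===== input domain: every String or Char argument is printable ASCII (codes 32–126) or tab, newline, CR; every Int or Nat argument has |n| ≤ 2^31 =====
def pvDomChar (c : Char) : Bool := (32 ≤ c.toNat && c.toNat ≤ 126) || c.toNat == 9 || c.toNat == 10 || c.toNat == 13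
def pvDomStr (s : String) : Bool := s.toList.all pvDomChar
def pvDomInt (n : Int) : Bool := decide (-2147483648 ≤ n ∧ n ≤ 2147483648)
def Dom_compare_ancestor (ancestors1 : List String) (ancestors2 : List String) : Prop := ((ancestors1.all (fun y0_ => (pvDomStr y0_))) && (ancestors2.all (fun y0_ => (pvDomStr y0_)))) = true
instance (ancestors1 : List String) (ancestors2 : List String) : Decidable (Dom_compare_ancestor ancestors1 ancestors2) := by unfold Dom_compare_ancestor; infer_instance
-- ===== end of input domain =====

-- B replaces A's nested scan by a one-pass length-keyed bucket dict (faster: O(n*m) → O(n+m+output)).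

-- ===== PORT A =====
def compare_ancestor (ancestors1 : List String) (ancestors2 : List String) : List String :=
  ancestors1.foldl (fun ancestor_tmp ancestor1 =>
    ancestors2.foldl (fun acc ancestor2 =>
      if PySem.Str.len ancestor1 = PySem.Str.len ancestor2 then acc ++ [ancestor2] else acc)
      ancestor_tmp) []

-- ===== PORT B =====
def compare_ancestor_alt (ancestors1 : List String) (ancestors2 : List String) : List String :=
  let buckets : PySem.Dict Int (List String) :=
    ancestors2.foldl (fun d a => d.modify (PySem.Str.len a) [] (· ++ [a])) PySem.Dict.empty
  ancestors1.foldl (fun out a => out ++ buckets.getD (PySem.Str.len a) []) []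

-- ===== PRECONDITION & SPEC =====
def Spec_compare_ancestor (ancestors1 : List String) (ancestors2 : List String) (out : List String) : Prop := out = compare_ancestor_alt ancestors1 ancestors2
instance (ancestors1 : List String) (ancestors2 : List String) (out : List String) : Decidable (Spec_compare_ancestor ancestors1 ancestors2 out) := by unfold Spec_compare_ancestor; infer_instance

-- ===== CLAIM (what is proved, stated in full; the proofs are below) =====
def Claim_equal_compare_ancestor : Prop := ∀ (ancestors1 : List String) (ancestors2 : List String), Dom_compare_ancestor ancestors1 ancestors2 → Spec_compare_ancestor ancestors1 ancestors2 (compare_ancestor ancestors1 ancestors2)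

-- ===== LEMMAS AND PROOFS =====

-- B's bucket lookup is the filter of ancestors2 by string length.
theorem bucket_getD (ancestors2 : List String) (k : Int) :
    (ancestors2.foldl (fun d a => d.modify (PySem.Str.len a) [] (· ++ [a]))
        (PySem.Dict.empty : PySem.Dict Int (List String))).getD k []
      = ancestors2.filter (fun a => PySem.Str.len a == k) := by
  have h : ancestors2.foldl (fun d a => d.modify (PySem.Str.len a) [] (· ++ [a]))
        (PySem.Dict.empty : PySem.Dict Int (List String))
      = (ancestors2.map (fun a => (PySem.Str.len a, a))).foldl
          (fun d p => d.modify p.1 [] (· ++ [p.2])) PySem.Dict.empty := by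
    rw [List.foldl_map]
  rw [h, PySem.Dict.getD_foldl_modify_append]
  simp [List.filter_map, Function.comp_def]

-- Both sides equal the flatMap of the length-filter.
theorem compare_ancestor_eq_flatMap (ancestors1 ancestors2 : List String) :
    compare_ancestor ancestors1 ancestors2
      = ancestors1.flatMap (fun x => ancestors2.filter (fun y => PySem.Str.len x == PySem.Str.len y)) := by
  unfold compare_ancestor
  have h : ∀ (acc : List String) (x : String), x ∈ ancestors1 →
      ancestors2.foldl (fun acc y =>
        if PySem.Str.len x = PySem.Str.len y then acc ++ [y] else acc) acc
        = acc ++ ancestors2.filter (fun y => PySem.Str.len x == PySem.Str.len y) := by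
    intro acc x _
    simpa using PySem.List.foldl_append_if_eq_filter
      (fun y => PySem.Str.len x == PySem.Str.len y) ancestors2 acc
  refine (PySem.List.foldl_congr_mem ancestors1 _
      (fun acc x => acc ++ ancestors2.filter (fun y => PySem.Str.len x == PySem.Str.len y)) [] h).trans ?_
  rw [PySem.List.foldl_append_eq_flatMap]
  simp

-- ===== VERDICT (by name: the statement is the Claim_ definition above) =====
theorem compare_ancestor_spec : Claim_equal_compare_ancestor := by
  intro ancestors1 ancestors2 _
  unfold Spec_compare_ancestor compare_ancestor_alt
  rw [compare_ancestor_eq_flatMap]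
  have h : ∀ (acc : List String) (x : String), x ∈ ancestors1 →
      acc ++ (ancestors2.foldl (fun d a => d.modify (PySem.Str.len a) [] (· ++ [a]))
          (PySem.Dict.empty : PySem.Dict Int (List String))).getD (PySem.Str.len x) []
        = acc ++ ancestors2.filter (fun y => PySem.Str.len x == PySem.Str.len y) := by
    intro acc x _
    rw [bucket_getD]
    congr 1
    apply List.filter_congr
    intro y _
    simp [eq_comm]
  refine ((PySem.List.foldl_congr_mem ancestors1 _
      (fun acc x => acc ++ ancestors2.filter (fun y => PySem.Str.len x == PySem.Str.len y)) [] h).trans ?_).symm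
  rw [PySem.List.foldl_append_eq_flatMap]
  simp
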